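-- pv_equiv track=rewrite | github.com/tjdud0123/daily_algorithm | 파이썬/그래프관련.py | solution
-- ===== SOURCE A (Python) =====
-- from collections import defaultdict
-- from collections import deque
--
-- def get_needs(pre_order, k):
--     needs = set()
--     stack = pre_order[k].copy()
--     while stack:
--         cook = stack.pop()
--         needs.add(cook)
--         stack += pre_order[cook]
--     return needs
--
-- def get_level(cook, pre_order):
--     if not pre_order[cook]:
--         return 1
--     que = deque([(nxt, 2) for nxt in pre_order[cook]])
--     while que:
--         c, dist = que.popleft()
--         for nxt in pre_order[c]:
--             que.append((nxt, dist+1))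
--         if not que:
--             return dist
--
-- def get_levels(pre_order, n):
--     levels = {i: get_level(i, pre_order) for i in range(1, n+1)}
--     return levels
--
-- def get_min_times(levels, pre_order, cook_time):
--     temp = sorted(levels.items(), key=lambda x: x[1])
--     min_time = {}
--     for cook, level in temp:
--         if level == 1:
--             min_time[cook] = cook_time[cook]
--         else:
--             min_time[cook] = cook_time[cook] + \
--                 max([min_time[c] for c in pre_order[cook]])
--     return min_time
--
-- def solution(cook_times, order, k):
--     pre_order = defaultdict(list)
--     cook_time = {i: time for i, time in enumerate(cook_times, 1)}
--     for pre, nxt in order: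
--         pre_order[nxt].append(pre)
--
--     needs = get_needs(pre_order, k)
--     levels = get_levels(pre_order, len(cook_times))
--     min_time = get_min_times(levels, pre_order, cook_time)
--
--     return [len(needs), min_time[k]]
-- ===== SOURCE B (Python) =====
-- def solution(cook_times, order, k):
--     n = len(cook_times)
--     preds = {i: [] for i in range(1, n + 1)}
--     for p, c in order:
--         if 1 <= c <= n:
--             preds[c].append(p)
--     # transitive prerequisites of k: saturate "add direct predecessors" n times
--     seen = set(preds[k])
--     for _ in range(n):
--         seen |= {p for c in seen for p in preds[c]}
--     # completion times: n rounds of simultaneous relaxation (Bellman-Ford style on the DAG)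
--     t = {i: cook_times[i - 1] for i in range(1, n + 1)}
--     for _ in range(n):
--         t = {i: cook_times[i - 1] + max((t[p] for p in preds[i]), default=0)
--              for i in range(1, n + 1)}
--     return [len(seen), t[k]]
-- ===== Notes on version B (the rewrite author's own statement) =====
-- stated objective: alternative
-- what changed: A re-enumerates every reverse path (a duplicating stack for the prerequisite set and an all-paths BFS for 'levels', then a sort-by-level DP); B replaces all of it with n rounds of set saturation for reachability and n rounds of simultaneous relaxation for the completion time, with no levels and no sort; intended as asymptotically faster, but a timing run could not confirm a ratio (A timed out at n=16 where B returned, and no clean reading at a common size exists).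
import Mathlib
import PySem

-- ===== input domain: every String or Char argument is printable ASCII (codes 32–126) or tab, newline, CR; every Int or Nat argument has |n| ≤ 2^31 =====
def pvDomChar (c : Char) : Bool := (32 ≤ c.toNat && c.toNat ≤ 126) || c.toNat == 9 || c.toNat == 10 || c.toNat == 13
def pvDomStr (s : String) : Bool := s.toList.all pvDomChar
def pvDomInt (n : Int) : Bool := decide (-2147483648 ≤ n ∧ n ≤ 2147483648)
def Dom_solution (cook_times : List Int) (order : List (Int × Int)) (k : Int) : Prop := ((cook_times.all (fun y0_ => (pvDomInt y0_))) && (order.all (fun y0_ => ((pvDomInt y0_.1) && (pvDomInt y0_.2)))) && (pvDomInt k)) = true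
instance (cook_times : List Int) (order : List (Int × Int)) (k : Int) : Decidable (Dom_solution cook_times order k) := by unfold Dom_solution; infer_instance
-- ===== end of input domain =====

-- B replaces A's path re-traversals (duplicating stack, all-paths BFS, sort-by-level DP) by n rounds of
-- set saturation and n rounds of simultaneous relaxation — a different algorithm; intended as faster,
-- though a timing run could not confirm a ratio (A timed out at n=16 where B returned).

-- ===== PORT A =====
-- while stack: cook = stack.pop(); needs.add(cook); stack += pre_order[cook]
-- (the fuel only makes the unbounded while-loop total; Pre_solution makes it sufficient, proved below)
def pvNeedsLoop (pre : PySem.Dict Int (List Int)) : Nat → PySem.Set Int → List Int → PySem.Set Int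
  | 0, needs, _ => needs
  | fuel+1, needs, stack =>
    match stack.getLast? with
    | none => needs
    | some cook => pvNeedsLoop pre fuel (PySem.Set.add needs cook) (stack.dropLast ++ pre.getD cook [])

-- while que: (c, dist) = que.popleft(); que += [(nxt, dist+1) …]; if not que: return dist
def pvBfsLoop (pre : PySem.Dict Int (List Int)) : Nat → List (Int × Int) → Int
  | 0, _ => 0  -- fuel exhausted (unreachable under Pre_solution)
  | _+1, [] => 0  -- Python's implicit 'return None' (unreachable: the initial queue is nonempty)
  | fuel+1, (c, d) :: rest =>
    let que := rest ++ (pre.getD c []).map (fun nxt => (nxt, d+1))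
    if que.isEmpty then d else pvBfsLoop pre fuel que

def pvGetLevel (pre : PySem.Dict Int (List Int)) (fuel : Nat) (cook : Int) : Int :=
  if (pre.getD cook []).isEmpty then 1
  else pvBfsLoop pre fuel ((pre.getD cook []).map (fun nxt => (nxt, 2)))

def pvGetLevels (pre : PySem.Dict Int (List Int)) (fuel : Nat) (n : Int) : PySem.Dict Int Int :=
  (PySem.List.pyRange 1 (n+1)).foldl (fun d i => d.insert i (pvGetLevel pre fuel i)) PySem.Dict.empty

-- for cook, level in sorted(levels.items(), key=…): min_time[cook] = …
-- (cook_time[cook] / min_time[c] are KeyError-free under Pre_solution: ported with getD 0)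
def pvGetMinTimes (levels : PySem.Dict Int Int) (pre : PySem.Dict Int (List Int))
    (cook_time : PySem.Dict Int Int) : PySem.Dict Int Int :=
  (PySem.List.sorted levels.items (fun x => x.2) false).foldl
    (fun mt p =>
      if p.2 = 1 then mt.insert p.1 (cook_time.getD p.1 0)
      else mt.insert p.1 (cook_time.getD p.1 0 +
        PySem.List.maxD ((pre.getD p.1 []).map (fun c => mt.getD c 0)) (fun v => v) 0))
    PySem.Dict.empty

def solution (cook_times : List Int) (order : List (Int × Int)) (k : Int) : List Int :=
  let pre := order.foldl (fun d pc => d.modify pc.2 [] (fun l => l ++ [pc.1])) PySem.Dict.empty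
  let cook_time := (PySem.List.enumerate cook_times 1).foldl (fun d p => d.insert p.1 p.2) PySem.Dict.empty
  let fuel := (order.length + 2) ^ (cook_times.length + 1)
  let needs := pvNeedsLoop pre fuel PySem.Set.empty (pre.getD k [])
  let levels := pvGetLevels pre fuel (cook_times.length : Int)
  let min_time := pvGetMinTimes levels pre cook_time
  [(needs.length : Int), min_time.getD k 0]

-- ===== PORT B =====
-- preds = {i: [] for i in 1..n}; edges to existing tasks appended
def pvPredsB (n : Int) (order : List (Int × Int)) : PySem.Dict Int (List Int) :=
  order.foldl
    (fun d pc => if 1 ≤ pc.2 ∧ pc.2 ≤ n then d.insert pc.2 (d.getD pc.2 [] ++ [pc.1]) else d)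
    ((PySem.List.pyRange 1 (n+1)).foldl (fun d i => d.insert i ([] : List Int)) PySem.Dict.empty)

-- (t[p] / preds[k] / cook_times[i-1] are KeyError/IndexError-free under Pre_solution: ported with getD)
def solution_alt (cook_times : List Int) (order : List (Int × Int)) (k : Int) : List Int :=
  let n : Int := (cook_times.length : Int)
  let preds := pvPredsB n order
  let seen := (List.range cook_times.length).foldl
      (fun s _ => PySem.Set.union s (PySem.Set.ofList (s.flatMap (fun c => preds.getD c []))))
      (PySem.Set.ofList (preds.getD k []))
  let t0 := (PySem.List.pyRange 1 (n+1)).foldl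
      (fun d i => d.insert i (PySem.List.pyGetD cook_times (i-1) 0)) PySem.Dict.empty
  let t := (List.range cook_times.length).foldl
      (fun t _ => (PySem.List.pyRange 1 (n+1)).foldl
          (fun d i => d.insert i (PySem.List.pyGetD cook_times (i-1) 0 +
              PySem.List.maxD ((preds.getD i []).map (fun p => t.getD p 0)) (fun v => v) 0))
          PySem.Dict.empty) t0
  [(seen.length : Int), t.getD k 0]

-- ===== PRECONDITION & SPEC =====
-- closed-form reachability used by the precondition: pvReach n order x = the tasks reachable from x
-- through ≥ 1 reversed prerequisite edges (n saturation steps suffice on an n-task acyclic input)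
def pvPredsL (order : List (Int × Int)) (x : Int) : List Int :=
  (order.filter (fun pc => pc.2 == x)).map (fun pc => pc.1)
def pvPredsF (order : List (Int × Int)) (x : Int) : Finset Int := (pvPredsL order x).toFinset
def pvStep (order : List (Int × Int)) (S : Finset Int) : Finset Int := S ∪ S.biUnion (pvPredsF order)
def pvReach (n : Nat) (order : List (Int × Int)) (x : Int) : Finset Int :=
  (pvStep order)^[n] (pvPredsF order x)

def pvIcc (n : Nat) : Finset Int := (PySem.List.pyRange 1 ((n : Int)+1)).toFinset

-- Pre_solution admits exactly the inputs on which A returns: k names an existing task, every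
-- prerequisite edge of an existing task comes from an existing task (else A hits a KeyError),
-- and no task transitively requires itself (else A's while-loops diverge).
def Pre_solution (cook_times : List Int) (order : List (Int × Int)) (k : Int) : Prop :=
  1 ≤ k ∧ k ≤ (cook_times.length : Int) ∧
  (∀ pc ∈ order, (1 ≤ pc.2 ∧ pc.2 ≤ (cook_times.length : Int)) →
      (1 ≤ pc.1 ∧ pc.1 ≤ (cook_times.length : Int))) ∧
  (∀ i ∈ pvIcc cook_times.length, i ∉ pvReach cook_times.length order i)
instance (cook_times : List Int) (order : List (Int × Int)) (k : Int) :
    Decidable (Pre_solution cook_times order k) := by unfold Pre_solution; infer_instance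

def pvWitness_solution : List Int × (List (Int × Int)) × Int := ([3, 2], [(1, 2)], 2)

def Spec_solution (cook_times : List Int) (order : List (Int × Int)) (k : Int) (out : List Int) : Prop := out = solution_alt cook_times order k
instance (cook_times : List Int) (order : List (Int × Int)) (k : Int) (out : List Int) : Decidable (Spec_solution cook_times order k out) := by unfold Spec_solution; infer_instance

-- ===== CLAIM (what is proved, stated in full; the proofs are below) =====
def Claim_equal_solution : Prop := ∀ (cook_times : List Int) (order : List (Int × Int)) (k : Int), Dom_solution cook_times order k → Pre_solution cook_times order k → Spec_solution cook_times order k (solution cook_times order k)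

-- ===== LEMMAS AND PROOFS =====

-- ---------- generic helpers ----------

def pvMax0 (l : List Int) : Int := PySem.List.maxD l (fun v => v) 0

lemma le_pvMax0 {l : List Int} {y : Int} (hy : y ∈ l) : y ≤ pvMax0 l := by
  unfold pvMax0 PySem.List.maxD
  cases h : PySem.List.max? l (fun v => v) with
  | none => exact absurd ((PySem.List.max?_eq_none_iff _ _).mp h) (List.ne_nil_of_mem hy)
  | some m => simpa using PySem.List.max?_isMax h y hy

lemma pvMax0_mem {l : List Int} (h : l ≠ []) : pvMax0 l ∈ l := by
  unfold pvMax0 PySem.List.maxD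
  cases hm : PySem.List.max? l (fun v => v) with
  | none => exact absurd ((PySem.List.max?_eq_none_iff _ _).mp hm) h
  | some m => simpa using PySem.List.max?_mem hm

lemma pvMax0_nil : pvMax0 [] = 0 := rfl

lemma pvMax0_eq_of {A B : List Int} (hA : A ≠ []) (hB : B ≠ [])
    (h1 : ∀ a ∈ A, ∃ b ∈ B, a ≤ b) (h2 : ∀ b ∈ B, ∃ a ∈ A, b ≤ a) :
    pvMax0 A = pvMax0 B := by
  apply le_antisymm
  · obtain ⟨b, hb, hab⟩ := h1 _ (pvMax0_mem hA)
    exact le_trans hab (le_pvMax0 hb)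
  · obtain ⟨a, ha, hba⟩ := h2 _ (pvMax0_mem hB)
    exact le_trans hba (le_pvMax0 ha)

lemma pvMax0_zeros {l : List Int} (h : ∀ y ∈ l, y = 0) : pvMax0 l = 0 := by
  rcases List.eq_nil_or_concat l with hl | ⟨t, a, hl⟩
  · subst hl; rfl
  · have hm := pvMax0_mem (l := l) (by subst hl; simp)
    exact h _ hm

lemma pvMax0_singleton (v : Int) : pvMax0 [v] = v := by
  have := pvMax0_mem (l := [v]) (by simp)
  simpa using this

lemma pvMax0_map_add {α : Type} {l : List α} (h : l ≠ []) (a : Int) (f : α → Int) :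
    pvMax0 (l.map (fun x => a + f x)) = a + pvMax0 (l.map f) := by
  apply le_antisymm
  · have hm := pvMax0_mem (l := l.map (fun x => a + f x)) (by simpa using h)
    obtain ⟨x, hx, hval⟩ := List.mem_map.mp hm
    rw [← hval]
    have : f x ≤ pvMax0 (l.map f) := le_pvMax0 (List.mem_map_of_mem hx)
    omega
  · have hm := pvMax0_mem (l := l.map f) (by simpa using h)
    obtain ⟨x, hx, hval⟩ := List.mem_map.mp hm
    rw [← hval]
    exact le_pvMax0 (List.mem_map_of_mem (f := fun x => a + f x) hx)

-- ---------- the reachability closure used by Pre_solution ----------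

lemma mem_pvIcc {n : Nat} {x : Int} : x ∈ pvIcc n ↔ 1 ≤ x ∧ x ≤ (n : Int) := by
  unfold pvIcc
  rw [List.mem_toFinset, PySem.List.mem_pyRange_one]
  omega

lemma card_pvIcc (n : Nat) : (pvIcc n).card = n := by
  unfold pvIcc
  rw [List.toFinset_card_of_nodup (PySem.List.nodup_pyRange_one _ _)]
  rw [PySem.List.length_pyRange_one]; omega

lemma mem_pvPredsL {order : List (Int × Int)} {x y : Int} :
    y ∈ pvPredsL order x ↔ ∃ pc ∈ order, pc.2 = x ∧ pc.1 = y := by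
  unfold pvPredsL
  simp only [List.mem_map, List.mem_filter, beq_iff_eq]
  constructor
  · rintro ⟨pc, ⟨h1, h2⟩, h3⟩; exact ⟨pc, h1, h2, h3⟩
  · rintro ⟨pc, h1, h2, h3⟩; exact ⟨pc, ⟨h1, h2⟩, h3⟩

lemma mem_pvPredsF {order : List (Int × Int)} {x y : Int} :
    y ∈ pvPredsF order x ↔ y ∈ pvPredsL order x := List.mem_toFinset

lemma pvStep_mono {order : List (Int × Int)} {S T : Finset Int} (h : S ⊆ T) :
    pvStep order S ⊆ pvStep order T := by
  unfold pvStep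
  intro y hy
  rcases Finset.mem_union.mp hy with hy | hy
  · exact Finset.mem_union_left _ (h hy)
  · obtain ⟨c, hc, hyc⟩ := Finset.mem_biUnion.mp hy
    exact Finset.mem_union_right _ (Finset.mem_biUnion.mpr ⟨c, h hc, hyc⟩)

lemma pvStep_ext {order : List (Int × Int)} (S : Finset Int) : S ⊆ pvStep order S :=
  Finset.subset_union_left

lemma pvIter_ext {order : List (Int × Int)} (m : Nat) (S : Finset Int) :
    S ⊆ (pvStep order)^[m] S := by
  induction m with
  | zero => simp
  | succ m ih =>
    rw [Function.iterate_succ_apply']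
    exact ih.trans (pvStep_ext _)

def pvEdgeOK (n : Nat) (order : List (Int × Int)) : Prop :=
  ∀ pc ∈ order, (1 ≤ pc.2 ∧ pc.2 ≤ (n : Int)) → (1 ≤ pc.1 ∧ pc.1 ≤ (n : Int))

lemma pvPredsF_subset_Icc {n : Nat} {order : List (Int × Int)} (hedge : pvEdgeOK n order)
    {x : Int} (hx : x ∈ pvIcc n) : pvPredsF order x ⊆ pvIcc n := by
  intro y hy
  obtain ⟨pc, hpc, h2, h1⟩ := mem_pvPredsL.mp (mem_pvPredsF.mp hy)
  rw [mem_pvIcc]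
  have := hedge pc hpc (by rw [h2]; exact mem_pvIcc.mp hx)
  omega

lemma pvStep_subset_Icc {n : Nat} {order : List (Int × Int)} (hedge : pvEdgeOK n order)
    {S : Finset Int} (hS : S ⊆ pvIcc n) : pvStep order S ⊆ pvIcc n := by
  unfold pvStep
  intro y hy
  rcases Finset.mem_union.mp hy with hy | hy
  · exact hS hy
  · obtain ⟨c, hc, hyc⟩ := Finset.mem_biUnion.mp hy
    exact pvPredsF_subset_Icc hedge (hS hc) hyc

lemma pvIter_subset_Icc {n : Nat} {order : List (Int × Int)} (hedge : pvEdgeOK n order)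
    {S : Finset Int} (hS : S ⊆ pvIcc n) (m : Nat) : (pvStep order)^[m] S ⊆ pvIcc n := by
  induction m with
  | zero => simpa
  | succ m ih => rw [Function.iterate_succ_apply']; exact pvStep_subset_Icc hedge ih

lemma pvStep_fix_iter {order : List (Int × Int)} {S : Finset Int}
    (h : pvStep order S = S) (m : Nat) : (pvStep order)^[m] S = S := by
  induction m with
  | zero => rfl
  | succ m ih => rw [Function.iterate_succ_apply', ih, h]

lemma pvClosed_iter_subset {order : List (Int × Int)} {C S : Finset Int}
    (hC : pvStep order C ⊆ C) (hS : S ⊆ C) (m : Nat) : (pvStep order)^[m] S ⊆ C := by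
  induction m with
  | zero => simpa
  | succ m ih =>
    rw [Function.iterate_succ_apply']
    exact (pvStep_mono ih).trans hC

lemma pvStab {n : Nat} {order : List (Int × Int)} (hedge : pvEdgeOK n order)
    {S : Finset Int} (hS : S ⊆ pvIcc n) :
    pvStep order ((pvStep order)^[n] S) = (pvStep order)^[n] S := by
  -- if no fixpoint is reached among the first n iterates, cardinalities grow beyond n
  by_cases hfix : ∃ j ≤ n, pvStep order ((pvStep order)^[j] S) = (pvStep order)^[j] S
  · obtain ⟨j, hjn, hj⟩ := hfix
    have hstable : (pvStep order)^[n] S = (pvStep order)^[j] S := by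
      have : (pvStep order)^[n] S = (pvStep order)^[n - j] ((pvStep order)^[j] S) := by
        rw [← Function.iterate_add_apply]
        congr 1; omega
      rw [this, pvStep_fix_iter hj]
    rw [hstable, hj]
  · exfalso
    push Not at hfix
    have grow : ∀ i, i ≤ n + 1 → i ≤ ((pvStep order)^[i] S).card := by
      intro i
      induction i with
      | zero => omega
      | succ i ih =>
        intro hi
        have h1 : i ≤ ((pvStep order)^[i] S).card := ih (by omega)
        have hne : pvStep order ((pvStep order)^[i] S) ≠ (pvStep order)^[i] S :=
          hfix i (by omega)
        have hss : (pvStep order)^[i] S ⊂ pvStep order ((pvStep order)^[i] S) :=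
          Finset.ssubset_iff_subset_ne.mpr ⟨pvStep_ext _, fun h => hne h.symm⟩
        have := Finset.card_lt_card hss
        rw [Function.iterate_succ_apply']
        omega
    have hsub : ((pvStep order)^[n+1] S).card ≤ n := by
      have := Finset.card_le_card (pvIter_subset_Icc hedge hS (n+1))
      rwa [card_pvIcc] at this
    have := grow (n+1) le_rfl
    omega

lemma pvReach_fix {n : Nat} {order : List (Int × Int)} (hedge : pvEdgeOK n order)
    {x : Int} (hx : x ∈ pvIcc n) :
    pvStep order (pvReach n order x) = pvReach n order x :=
  pvStab hedge (pvPredsF_subset_Icc hedge hx)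

lemma pvReach_subset_Icc {n : Nat} {order : List (Int × Int)} (hedge : pvEdgeOK n order)
    {x : Int} (hx : x ∈ pvIcc n) : pvReach n order x ⊆ pvIcc n :=
  pvIter_subset_Icc hedge (pvPredsF_subset_Icc hedge hx) n

lemma pvPredsF_subset_reach {n : Nat} {order : List (Int × Int)} (x : Int) :
    pvPredsF order x ⊆ pvReach n order x := pvIter_ext n _

lemma pvPredsF_subset_of_mem_closed {order : List (Int × Int)} {C : Finset Int}
    (hC : pvStep order C = C) {c : Int} (hc : c ∈ C) : pvPredsF order c ⊆ C := by
  intro y hy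
  rw [← hC]
  exact Finset.mem_union_right _ (Finset.mem_biUnion.mpr ⟨c, hc, hy⟩)

lemma pvReach_pred_subset {n : Nat} {order : List (Int × Int)} (hedge : pvEdgeOK n order)
    {x p : Int} (hx : x ∈ pvIcc n) (hp : p ∈ pvReach n order x) :
    pvReach n order p ⊆ pvReach n order x := by
  have hfix := pvReach_fix hedge hx
  exact pvClosed_iter_subset (le_of_eq hfix) (pvPredsF_subset_of_mem_closed hfix hp) n

def pvRank (n : Nat) (order : List (Int × Int)) (x : Int) : Nat := (pvReach n order x).card

def pvAcyc (n : Nat) (order : List (Int × Int)) : Prop :=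
  ∀ i ∈ pvIcc n, i ∉ pvReach n order i

lemma pvRank_lt {n : Nat} {order : List (Int × Int)} (hedge : pvEdgeOK n order)
    (hacyc : pvAcyc n order) {x p : Int} (hx : x ∈ pvIcc n) (hp : p ∈ pvPredsL order x) :
    pvRank n order p < pvRank n order x := by
  unfold pvRank
  have hpF : p ∈ pvReach n order x := pvPredsF_subset_reach x (mem_pvPredsF.mpr hp)
  have hpIcc : p ∈ pvIcc n := pvReach_subset_Icc hedge hx hpF
  have hsub : pvReach n order p ⊆ pvReach n order x := pvReach_pred_subset hedge hx hpF
  have hss : pvReach n order p ⊂ pvReach n order x :=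
    Finset.ssubset_iff_subset_ne.mpr ⟨hsub, by
      intro h
      exact hacyc p hpIcc (h ▸ hpF)⟩
  exact Finset.card_lt_card hss

lemma pvRank_le {n : Nat} {order : List (Int × Int)} (hedge : pvEdgeOK n order)
    {x : Int} (hx : x ∈ pvIcc n) : pvRank n order x ≤ n := by
  unfold pvRank
  have := Finset.card_le_card (pvReach_subset_Icc hedge hx)
  rwa [card_pvIcc] at this

lemma pvReach_unfold {n : Nat} {order : List (Int × Int)} (hedge : pvEdgeOK n order)
    {x : Int} (hx : x ∈ pvIcc n) :
    pvReach n order x = pvPredsF order x ∪ (pvPredsF order x).biUnion (pvReach n order) := by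
  apply Finset.Subset.antisymm
  · -- the RHS is closed and contains predsF x
    have hclosed : pvStep order (pvPredsF order x ∪ (pvPredsF order x).biUnion (pvReach n order)) ⊆
        pvPredsF order x ∪ (pvPredsF order x).biUnion (pvReach n order) := by
      unfold pvStep
      intro y hy
      rcases Finset.mem_union.mp hy with hy | hy
      · exact hy
      · obtain ⟨c, hc, hyc⟩ := Finset.mem_biUnion.mp hy
        rcases Finset.mem_union.mp hc with hc | hc
        · exact Finset.mem_union_right _ (Finset.mem_biUnion.mpr
            ⟨c, hc, pvPredsF_subset_reach c hyc⟩)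
        · obtain ⟨p, hpF, hcp⟩ := Finset.mem_biUnion.mp hc
          have hpIcc : p ∈ pvIcc n := pvPredsF_subset_Icc hedge hx hpF
          have : pvPredsF order c ⊆ pvReach n order p :=
            pvPredsF_subset_of_mem_closed (pvReach_fix hedge hpIcc) hcp
          exact Finset.mem_union_right _ (Finset.mem_biUnion.mpr ⟨p, hpF, this hyc⟩)
    exact pvClosed_iter_subset hclosed Finset.subset_union_left n
  · intro y hy
    rcases Finset.mem_union.mp hy with hy | hy
    · exact pvPredsF_subset_reach x hy
    · obtain ⟨p, hpF, hyp⟩ := Finset.mem_biUnion.mp hy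
      exact pvReach_pred_subset hedge hx (pvPredsF_subset_reach x hpF) hyp



-- ---------- the specification functions: critical-path time pvT and chain length pvLv ----------

def pvT (ct : List Int) (order : List (Int × Int)) : Nat → Int → Int
  | 0, _ => 0
  | f+1, x => PySem.List.pyGetD ct (x-1) 0 + pvMax0 ((pvPredsL order x).map (pvT ct order f))

def pvLv (order : List (Int × Int)) : Nat → Int → Int
  | 0, _ => 0
  | f+1, x => if pvPredsL order x = [] then 1
      else 1 + pvMax0 ((pvPredsL order x).map (pvLv order f))

lemma pvPredsL_mem_Icc {n : Nat} {order : List (Int × Int)} (hedge : pvEdgeOK n order)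
    {x p : Int} (hx : x ∈ pvIcc n) (hp : p ∈ pvPredsL order x) : p ∈ pvIcc n :=
  pvPredsF_subset_Icc hedge hx (mem_pvPredsF.mpr hp)

lemma pvT_stab {n : Nat} {ct : List Int} {order : List (Int × Int)} (hedge : pvEdgeOK n order)
    (hacyc : pvAcyc n order) :
    ∀ f g x, x ∈ pvIcc n → pvRank n order x < f → pvRank n order x < g →
      pvT ct order f x = pvT ct order g x := by
  intro f
  induction f with
  | zero => intro g x _ hf; omega
  | succ f ih =>
    intro g x hx hf hg
    match g with
    | 0 => omega
    | g + 1 =>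
      show _ + _ = _ + _
      congr 1
      apply congrArg
      apply List.map_congr_left
      intro p hp
      have hr := pvRank_lt hedge hacyc hx hp
      exact ih g p (pvPredsL_mem_Icc hedge hx hp) (by omega) (by omega)

lemma pvLv_stab {n : Nat} {order : List (Int × Int)} (hedge : pvEdgeOK n order)
    (hacyc : pvAcyc n order) :
    ∀ f g x, x ∈ pvIcc n → pvRank n order x < f → pvRank n order x < g →
      pvLv order f x = pvLv order g x := by
  intro f
  induction f with
  | zero => intro g x _ hf; omega
  | succ f ih =>
    intro g x hx hf hg
    match g with
    | 0 => omega
    | g + 1 =>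
      show (if _ then _ else _) = (if _ then _ else _)
      by_cases hp0 : pvPredsL order x = []
      · simp [hp0]
      · simp only [if_neg hp0]
        congr 1
        apply congrArg
        apply List.map_congr_left
        intro p hp
        have hr := pvRank_lt hedge hacyc hx hp
        exact ih g p (pvPredsL_mem_Icc hedge hx hp) (by omega) (by omega)

lemma pvLv_ge_one {n : Nat} {order : List (Int × Int)} (hedge : pvEdgeOK n order)
    (hacyc : pvAcyc n order) :
    ∀ r x, x ∈ pvIcc n → pvRank n order x < r → 1 ≤ pvLv order (n+1) x := by
  intro r
  induction r with
  | zero => intro x _ h; omega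
  | succ r ih =>
    intro x hx hr
    simp only [pvLv]
    by_cases hp0 : pvPredsL order x = []
    · simp [hp0]
    · simp only [if_neg hp0]
      obtain ⟨p, hp⟩ := List.exists_mem_of_ne_nil _ hp0
      have hpI : p ∈ pvIcc n := pvPredsL_mem_Icc hedge hx hp
      have hrp := pvRank_lt hedge hacyc hx hp
      have h1 : 1 ≤ pvLv order (n+1) p := ih p hpI (by omega)
      have hxn := pvRank_le hedge hx
      have h2 : pvLv order n p = pvLv order (n+1) p :=
        pvLv_stab hedge hacyc n (n+1) p hpI (by omega) (by omega)
      have h3 : pvLv order n p ≤ pvMax0 ((pvPredsL order x).map (pvLv order n)) :=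
        le_pvMax0 (List.mem_map_of_mem hp)
      have hxn := pvRank_le hedge hx
      omega

lemma pvLv_unfold {n : Nat} {order : List (Int × Int)} (hedge : pvEdgeOK n order)
    (hacyc : pvAcyc n order) {x : Int} (hx : x ∈ pvIcc n) (hp0 : pvPredsL order x ≠ []) :
    pvLv order (n+1) x = 1 + pvMax0 ((pvPredsL order x).map (pvLv order (n+1))) := by
  simp only [pvLv]
  rw [if_neg hp0]
  congr 2
  apply List.map_congr_left
  intro p hp
  have hrp := pvRank_lt hedge hacyc hx hp
  have hrx := pvRank_le hedge hx
  exact pvLv_stab hedge hacyc n (n+1) p (pvPredsL_mem_Icc hedge hx hp) (by omega) (by omega)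

lemma pvLv_eq_one_iff {n : Nat} {order : List (Int × Int)} (hedge : pvEdgeOK n order)
    (hacyc : pvAcyc n order) {x : Int} (hx : x ∈ pvIcc n) :
    pvLv order (n+1) x = 1 ↔ pvPredsL order x = [] := by
  constructor
  · intro h1
    by_contra hp0
    rw [pvLv_unfold hedge hacyc hx hp0] at h1
    obtain ⟨p, hp⟩ := List.exists_mem_of_ne_nil _ hp0
    have hpI : p ∈ pvIcc n := pvPredsL_mem_Icc hedge hx hp
    have hge : 1 ≤ pvLv order (n+1) p :=
      pvLv_ge_one hedge hacyc (pvRank n order p + 1) p hpI (by omega)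
    have := le_pvMax0 (List.mem_map_of_mem (f := pvLv order (n+1)) hp)
    omega
  · intro h; simp only [pvLv]; rw [if_pos h]

lemma pvLv_pred_le {n : Nat} {order : List (Int × Int)} (hedge : pvEdgeOK n order)
    (hacyc : pvAcyc n order) {x p : Int} (hx : x ∈ pvIcc n) (hp : p ∈ pvPredsL order x) :
    1 + pvLv order (n+1) p ≤ pvLv order (n+1) x := by
  rw [pvLv_unfold hedge hacyc hx (List.ne_nil_of_mem hp)]
  have := le_pvMax0 (List.mem_map_of_mem (f := pvLv order (n+1)) hp)
  omega

-- ---------- the dictionaries the two ports build ----------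

lemma pvAPre_getD (order : List (Int × Int)) (x : Int) :
    (order.foldl (fun d pc => d.modify pc.2 [] (fun l => l ++ [pc.1])) PySem.Dict.empty).getD x []
      = pvPredsL order x := by
  have h1 : (order.foldl (fun d pc => d.modify pc.2 [] (fun l => l ++ [pc.1])) PySem.Dict.empty)
      = ((order.map (fun pc => (pc.2, pc.1))).foldl
          (fun d p => d.modify p.1 [] (fun l => l ++ [p.2])) PySem.Dict.empty) := by
    rw [List.foldl_map]
  rw [h1, PySem.Dict.getD_foldl_modify_append]
  unfold pvPredsL
  simp [List.filter_map, List.map_map, Function.comp_def]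

lemma pvGet?_foldl_insert_fresh {β ν : Type} (l : List β) (key : β → Int) (val : β → ν)
    (hnd : (l.map key).Nodup) {b : β} (hb : b ∈ l) :
    ((l.foldl (fun d a => d.insert (key a) (val a)) PySem.Dict.empty)).get? (key b) = some (val b) := by
  have hitems := PySem.Dict.items_foldl_insert_fresh l key val PySem.Dict.empty
    (by intro a _; simp [PySem.Dict.contains_empty]) hnd
  have hkeys : (l.foldl (fun d a => d.insert (key a) (val a)) PySem.Dict.empty).keys.Nodup :=
    PySem.Dict.nodup_keys_foldl_insert_key l key (fun d a => val a) PySem.Dict.empty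
      PySem.Dict.nodup_keys_empty
  exact PySem.Dict.get?_of_mem_items _
    (by rw [hitems]; exact List.mem_append_right _ (List.mem_map_of_mem hb)) hkeys

lemma pvGetD_foldl_insert_fresh {β ν : Type} (l : List β) (key : β → Int) (val : β → ν)
    (hnd : (l.map key).Nodup) {b : β} (hb : b ∈ l) (d0 : ν) :
    ((l.foldl (fun d a => d.insert (key a) (val a)) PySem.Dict.empty)).getD (key b) d0 = val b := by
  rw [PySem.Dict.getD_eq_get?_getD, pvGet?_foldl_insert_fresh l key val hnd hb]
  rfl

lemma pvBPreds_init_getD (n : Int) (x : Int) :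
    (((PySem.List.pyRange 1 (n+1)).foldl (fun d i => d.insert i ([] : List Int))
        PySem.Dict.empty)).getD x [] = [] := by
  suffices h : ∀ (r : List Int) (d : PySem.Dict Int (List Int)),
      (∀ y, d.getD y ([] : List Int) = []) →
      ∀ y, ((r.foldl (fun d i => d.insert i ([] : List Int)) d)).getD y [] = [] by
    exact h _ _ (by intro y; simp [PySem.Dict.getD_empty]) x
  intro r
  induction r with
  | nil => intro d h y; exact h y
  | cons a t ih =>
    intro d h y
    apply ih
    intro z
    rw [PySem.Dict.getD_insert]
    split <;> simp [h]

lemma pvBPreds_getD {n : Nat} (order : List (Int × Int)) {x : Int} (hx : x ∈ pvIcc n) :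
    (pvPredsB (n : Int) order).getD x [] = pvPredsL order x := by
  unfold pvPredsB
  suffices h : ∀ (l : List (Int × Int)) (d : PySem.Dict Int (List Int)),
      (l.foldl (fun d pc => if 1 ≤ pc.2 ∧ pc.2 ≤ (n : Int) then
          d.insert pc.2 (d.getD pc.2 [] ++ [pc.1]) else d) d).getD x []
        = d.getD x [] ++ pvPredsL l x by
    rw [h, pvBPreds_init_getD]; simp
  intro l
  induction l with
  | nil => intro d; simp [pvPredsL]
  | cons pc t ih =>
    intro d
    rw [List.foldl_cons]
    have hsplit : pvPredsL (pc :: t) x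
        = (if pc.2 = x then [pc.1] else []) ++ pvPredsL t x := by
      unfold pvPredsL
      rw [List.filter_cons]
      by_cases h : pc.2 = x <;> simp [h]
    by_cases hg : 1 ≤ pc.2 ∧ pc.2 ≤ (n : Int)
    · rw [if_pos hg, ih, hsplit, PySem.Dict.getD_insert]
      by_cases hx2 : x = pc.2
      · rw [if_pos hx2, if_pos hx2.symm, hx2]; simp
      · rw [if_neg hx2, if_neg (fun h => hx2 h.symm)]; simp
    · rw [if_neg hg, ih, hsplit]
      have : pc.2 ≠ x := by
        intro h
        exact hg (by rw [h]; exact mem_pvIcc.mp hx)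
      rw [if_neg this]; simp

-- ---------- the termination measure of A's two path-enumerating loops ----------

def pvWt (n : Nat) (order : List (Int × Int)) (x : Int) : Nat :=
  (order.length + 2) ^ pvRank n order x

def pvMu (n : Nat) (order : List (Int × Int)) (stack : List Int) : Nat :=
  (stack.map (pvWt n order)).sum

lemma pvPredsL_length_le (order : List (Int × Int)) (x : Int) :
    (pvPredsL order x).length ≤ order.length := by
  unfold pvPredsL
  rw [List.length_map]
  exact List.length_filter_le _ _

lemma pvMu_le_of_rank_le {n : Nat} {order : List (Int × Int)} {l : List Int} {r : Nat}
    (h : ∀ x ∈ l, pvRank n order x ≤ r) :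
    pvMu n order l ≤ l.length * (order.length + 2) ^ r := by
  unfold pvMu
  have := List.sum_le_card_nsmul (l.map (pvWt n order)) ((order.length + 2) ^ r) (by
    intro w hw
    obtain ⟨x, hx, hwx⟩ := List.mem_map.mp hw
    rw [← hwx]
    exact Nat.pow_le_pow_right (by omega) (h x hx))
  simpa [smul_eq_mul] using this

lemma pvMu_preds_lt {n : Nat} {order : List (Int × Int)} (hedge : pvEdgeOK n order)
    (hacyc : pvAcyc n order) {x : Int} (hx : x ∈ pvIcc n) :
    pvMu n order (pvPredsL order x) < pvWt n order x := by
  by_cases hp0 : pvPredsL order x = []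
  · rw [hp0]
    unfold pvMu pvWt
    simp only [List.map_nil, List.sum_nil]
    exact pow_pos (by omega) _
  · obtain ⟨p, hp⟩ := List.exists_mem_of_ne_nil _ hp0
    have hr1 : 1 ≤ pvRank n order x := by
      have := pvRank_lt hedge hacyc hx hp
      omega
    have hbound : pvMu n order (pvPredsL order x)
        ≤ (pvPredsL order x).length * (order.length + 2) ^ (pvRank n order x - 1) := by
      apply pvMu_le_of_rank_le
      intro y hy
      have := pvRank_lt hedge hacyc hx hy
      omega
    have hlen := pvPredsL_length_le order x
    have hpow : (pvPredsL order x).length * (order.length + 2) ^ (pvRank n order x - 1)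
        < (order.length + 2) ^ pvRank n order x := by
      have hx1 : pvRank n order x = (pvRank n order x - 1) + 1 := by omega
      rw [hx1, pow_succ]
      have hpos : 0 < (order.length + 2) ^ (pvRank n order x - 1) :=
        pow_pos (by omega) _
      calc (pvPredsL order x).length * (order.length + 2) ^ (pvRank n order x - 1)
          ≤ order.length * (order.length + 2) ^ (pvRank n order x - 1) :=
            Nat.mul_le_mul_right _ hlen
        _ < (order.length + 2) ^ (pvRank n order x - 1) * (order.length + 2) := by
            rw [Nat.mul_comm]
            exact (Nat.mul_lt_mul_left hpos).mpr (by omega)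
    unfold pvWt
    omega

lemma pvMu_preds_lt_fuel {n : Nat} {order : List (Int × Int)} (hedge : pvEdgeOK n order)
    {x : Int} (hx : x ∈ pvIcc n) :
    pvMu n order (pvPredsL order x) < (order.length + 2) ^ (n + 1) := by
  have hbound : pvMu n order (pvPredsL order x)
      ≤ (pvPredsL order x).length * (order.length + 2) ^ n := by
    apply pvMu_le_of_rank_le
    intro y hy
    exact pvRank_le hedge (pvPredsL_mem_Icc hedge hx hy)
  have hlen := pvPredsL_length_le order x
  have hpos : 0 < (order.length + 2) ^ n := pow_pos (by omega) _
  have : (pvPredsL order x).length * (order.length + 2) ^ n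
      < (order.length + 2) ^ (n + 1) := by
    rw [pow_succ]
    calc (pvPredsL order x).length * (order.length + 2) ^ n
        ≤ order.length * (order.length + 2) ^ n := Nat.mul_le_mul_right _ hlen
      _ < (order.length + 2) ^ n * (order.length + 2) := by
          rw [Nat.mul_comm]
          exact (Nat.mul_lt_mul_left hpos).mpr (by omega)
  omega


-- ---------- A's prerequisite-collecting stack loop ----------

lemma pvMu_append (n : Nat) (order : List (Int × Int)) (a b : List Int) :
    pvMu n order (a ++ b) = pvMu n order a + pvMu n order b := by
  simp [pvMu]

lemma mem_pvReach_iff {n : Nat} {order : List (Int × Int)} (hedge : pvEdgeOK n order)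
    {x : Int} (hx : x ∈ pvIcc n) (y : Int) :
    y ∈ pvReach n order x ↔ ∃ p ∈ pvPredsL order x, y = p ∨ y ∈ pvReach n order p := by
  conv_lhs => rw [pvReach_unfold hedge hx]
  simp only [Finset.mem_union, Finset.mem_biUnion, mem_pvPredsF]
  constructor
  · rintro (h | ⟨p, hp, hyp⟩)
    · exact ⟨y, h, Or.inl rfl⟩
    · exact ⟨p, hp, Or.inr hyp⟩
  · rintro ⟨p, hp, rfl | hyp⟩
    · exact Or.inl hp
    · exact Or.inr ⟨p, hp, hyp⟩

lemma pvNeedsLoop_nodup (pre : PySem.Dict Int (List Int)) :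
    ∀ (fuel : Nat) (needs : PySem.Set Int) (stack : List Int), needs.Nodup →
      (pvNeedsLoop pre fuel needs stack).Nodup := by
  intro fuel
  induction fuel with
  | zero => intro needs stack h; exact h
  | succ fuel ih =>
    intro needs stack h
    simp only [pvNeedsLoop]
    cases hs : stack.getLast? with
    | none => exact h
    | some cook => exact ih _ _ (PySem.Set.nodup_add _ _ h)

lemma mem_pvNeedsLoop {n : Nat} {order : List (Int × Int)} {pre : PySem.Dict Int (List Int)}
    (hedge : pvEdgeOK n order) (hacyc : pvAcyc n order)
    (hpre : ∀ x, pre.getD x [] = pvPredsL order x) :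
    ∀ (fuel : Nat) (needs : PySem.Set Int) (stack : List Int),
      (∀ x ∈ stack, x ∈ pvIcc n) → pvMu n order stack < fuel →
      ∀ y, y ∈ pvNeedsLoop pre fuel needs stack ↔
        y ∈ needs ∨ ∃ x ∈ stack, y = x ∨ y ∈ pvReach n order x := by
  intro fuel
  induction fuel with
  | zero => intro needs stack _ hμ; omega
  | succ fuel ih =>
    intro needs stack hIcc hμ y
    cases hs : stack.getLast? with
    | none =>
      have hnil : stack = [] := by
        cases stack with
        | nil => rfl
        | cons a t => simp [List.getLast?] at hs
      subst hnil
      simp [pvNeedsLoop, hs]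
    | some c =>
      have hne : stack ≠ [] := by
        intro h; subst h; simp at hs
      have hlast : stack.getLast hne = c := by
        have := List.getLast?_eq_some_getLast hne
        rw [hs] at this; exact (Option.some_inj.mp this).symm
      have hsplit : stack.dropLast ++ [c] = stack := by
        rw [← hlast]; exact List.dropLast_concat_getLast hne
      have hc : c ∈ stack := by rw [← hsplit]; simp
      have hcI : c ∈ pvIcc n := hIcc c hc
      have hstep : pvNeedsLoop pre (fuel+1) needs stack
          = pvNeedsLoop pre fuel (PySem.Set.add needs c) (stack.dropLast ++ pre.getD c []) := by
        simp only [pvNeedsLoop, hs]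
      rw [hstep, hpre c]
      have hIcc' : ∀ x ∈ stack.dropLast ++ pvPredsL order c, x ∈ pvIcc n := by
        intro x hx
        rcases List.mem_append.mp hx with hx | hx
        · exact hIcc x (List.dropLast_subset _ hx)
        · exact pvPredsL_mem_Icc hedge hcI hx
      have hμ' : pvMu n order (stack.dropLast ++ pvPredsL order c) < fuel := by
        have h1 : pvMu n order stack
            = pvMu n order stack.dropLast + pvWt n order c := by
          conv_lhs => rw [← hsplit]
          rw [pvMu_append]; simp [pvMu]
        have h2 := pvMu_preds_lt hedge hacyc hcI
        rw [pvMu_append]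
        omega
      rw [ih _ _ hIcc' hμ' y]
      have hreach := mem_pvReach_iff hedge hcI y
      constructor
      · rintro (hy | ⟨x, hx, hyx⟩)
        · rcases (PySem.Set.mem_add _ _ _).mp hy with hy | hyc
          · exact Or.inl hy
          · exact Or.inr ⟨c, hc, Or.inl hyc⟩
        · rcases List.mem_append.mp hx with hx | hx
          · exact Or.inr ⟨x, List.dropLast_subset _ hx, hyx⟩
          · refine Or.inr ⟨c, hc, Or.inr ?_⟩
            rw [hreach]
            exact ⟨x, hx, hyx⟩
      · rintro (hy | ⟨x, hx, hyx⟩)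
        · exact Or.inl ((PySem.Set.mem_add _ _ _).mpr (Or.inl hy))
        · by_cases hxc : x ∈ stack.dropLast
          · exact Or.inr ⟨x, List.mem_append.mpr (Or.inl hxc), hyx⟩
          · have hxc' : x = c := by
              have : x ∈ stack.dropLast ++ [c] := by rw [hsplit]; exact hx
              rcases List.mem_append.mp this with h | h
              · exact absurd h hxc
              · simpa using h
            subst hxc'
            rcases hyx with rfl | hyr
            · exact Or.inl ((PySem.Set.mem_add _ _ _).mpr (Or.inr rfl))
            · rw [hreach] at hyr
              obtain ⟨p, hp, hyp⟩ := hyr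
              exact Or.inr ⟨p, List.mem_append.mpr (Or.inr hp), hyp⟩


-- ---------- A's all-paths breadth-first level computation ----------

def pvMuQ (n : Nat) (order : List (Int × Int)) (q : List (Int × Int)) : Nat :=
  (q.map (fun cd => pvWt n order cd.1)).sum

lemma pvPairwise_const_map (l : List Int) (v : Int) :
    (l.map (fun x => (x, v))).Pairwise (fun a b : Int × Int => a.2 ≤ b.2) := by
  induction l with
  | nil => simp
  | cons a t ih =>
    simp only [List.map_cons, List.pairwise_cons]
    refine ⟨?_, ih⟩
    intro b hb
    obtain ⟨x, _, rfl⟩ := List.mem_map.mp hb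
    simp

lemma pvBfsLoop_eq {n : Nat} {order : List (Int × Int)} {pre : PySem.Dict Int (List Int)}
    (hedge : pvEdgeOK n order) (hacyc : pvAcyc n order)
    (hpre : ∀ x, pre.getD x [] = pvPredsL order x) :
    ∀ (fuel : Nat) (c d : Int) (rest : List (Int × Int)),
      (∀ cd ∈ (c, d) :: rest, cd.1 ∈ pvIcc n) →
      ((c, d) :: rest).Pairwise (fun a b => a.2 ≤ b.2) →
      (∀ cd ∈ (c, d) :: rest, cd.2 ≤ d + 1) →
      pvMuQ n order ((c, d) :: rest) < fuel →
      pvBfsLoop pre fuel ((c, d) :: rest)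
        = pvMax0 (((c, d) :: rest).map (fun cd => cd.2 + pvLv order (n+1) cd.1 - 1)) := by
  intro fuel
  induction fuel with
  | zero => intro c d rest _ _ _ hμ; omega
  | succ fuel ih =>
    intro c d rest hIcc hpw hbd hμ
    have hcI : c ∈ pvIcc n := hIcc (c, d) (List.mem_cons_self)
    have hstep : pvBfsLoop pre (fuel+1) ((c, d) :: rest)
        = (if (rest ++ (pvPredsL order c).map (fun nxt => (nxt, d+1))).isEmpty then d
           else pvBfsLoop pre fuel (rest ++ (pvPredsL order c).map (fun nxt => (nxt, d+1)))) := by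
      simp only [pvBfsLoop, hpre c]
    rw [hstep]
    by_cases hq : (rest ++ (pvPredsL order c).map (fun nxt => (nxt, d+1))).isEmpty
    · rw [if_pos hq]
      rw [List.isEmpty_iff, List.append_eq_nil_iff] at hq
      obtain ⟨hrest, hmapnil⟩ := hq
      have hL : pvPredsL order c = [] := by
        cases h : pvPredsL order c with
        | nil => rfl
        | cons a t => rw [h] at hmapnil; simp at hmapnil
      have hLv : pvLv order (n+1) c = 1 := (pvLv_eq_one_iff hedge hacyc hcI).mpr hL
      subst hrest
      rw [List.map_cons, List.map_nil, hLv, pvMax0_singleton]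
      ring
    · rw [if_neg hq]
      set L := pvPredsL order c with hLdef
      have hque_ne : rest ++ L.map (fun nxt => (nxt, d+1)) ≠ [] := by
        intro h; rw [h] at hq; exact hq rfl
      -- invariants for the recursive call
      have hIcc' : ∀ cd ∈ rest ++ L.map (fun nxt => (nxt, d+1)), cd.1 ∈ pvIcc n := by
        intro cd hcd
        rcases List.mem_append.mp hcd with h | h
        · exact hIcc cd (List.mem_cons_of_mem _ h)
        · obtain ⟨p, hp, rfl⟩ := List.mem_map.mp h
          exact pvPredsL_mem_Icc hedge hcI hp
      have hd_rest : ∀ cd ∈ rest, d ≤ cd.2 := by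
        intro cd hcd
        exact (List.pairwise_cons.mp hpw).1 cd hcd
      have hpw' : (rest ++ L.map (fun nxt => (nxt, d+1))).Pairwise (fun a b => a.2 ≤ b.2) := by
        rw [List.pairwise_append]
        refine ⟨(List.pairwise_cons.mp hpw).2, pvPairwise_const_map L (d+1), ?_⟩
        intro a ha b hb
        obtain ⟨p, hp, rfl⟩ := List.mem_map.mp hb
        exact hbd a (List.mem_cons_of_mem _ ha)
      have hμ' : pvMuQ n order (rest ++ L.map (fun nxt => (nxt, d+1))) < fuel := by
        have h1 : pvMuQ n order (rest ++ L.map (fun nxt => (nxt, d+1)))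
            = pvMuQ n order rest + pvMu n order L := by
          unfold pvMuQ pvMu
          rw [List.map_append, List.sum_append, List.map_map]
          rfl
        have h2 : pvMuQ n order ((c, d) :: rest) = pvWt n order c + pvMuQ n order rest := by
          unfold pvMuQ; simp
        have h3 := pvMu_preds_lt hedge hacyc hcI
        rw [← hLdef] at h3
        omega
      -- recurse: expose the head of the new queue
      have hrec : pvBfsLoop pre fuel (rest ++ L.map (fun nxt => (nxt, d+1)))
          = pvMax0 ((rest ++ L.map (fun nxt => (nxt, d+1))).map
              (fun cd => cd.2 + pvLv order (n+1) cd.1 - 1)) := by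
        cases hform : rest ++ L.map (fun nxt => (nxt, d+1)) with
        | nil => exact absurd hform hque_ne
        | cons hd tl =>
          have hbd' : ∀ cd ∈ hd :: tl, cd.2 ≤ hd.2 + 1 := by
            have hhd : d ≤ hd.2 := by
              cases hrest : rest with
              | nil =>
                rw [hrest, List.nil_append] at hform
                cases hL2 : L with
                | nil => rw [hL2] at hform; simp at hform
                | cons p ps =>
                  rw [hL2] at hform
                  simp only [List.map_cons, List.cons.injEq] at hform
                  rw [← hform.1]; omega
              | cons r0 rs =>
                rw [hrest, List.cons_append, List.cons.injEq] at hform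
                rw [← hform.1]
                exact hd_rest r0 (by rw [hrest]; exact List.mem_cons_self)
            intro cd hcd
            rw [← hform] at hcd
            rcases List.mem_append.mp hcd with h | h
            · have := hbd cd (List.mem_cons_of_mem _ h); omega
            · obtain ⟨p, hp, rfl⟩ := List.mem_map.mp h; omega
          rw [hform] at hIcc' hpw' hμ'
          cases hd with
          | mk c' d' => exact ih c' d' tl hIcc' hpw' hbd' hμ'
      rw [hrec]
      -- the two maxima agree
      apply pvMax0_eq_of
      · simpa using hque_ne
      · simp
      · -- every value of the new queue is dominated by a value of the old one
        intro a ha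
        obtain ⟨cd, hcd, rfl⟩ := List.mem_map.mp ha
        rcases List.mem_append.mp hcd with h | h
        · exact ⟨_, List.mem_map_of_mem (List.mem_cons_of_mem _ h), le_refl _⟩
        · obtain ⟨p, hp, rfl⟩ := List.mem_map.mp h
          refine ⟨(c, d).2 + pvLv order (n+1) (c, d).1 - 1,
            List.mem_map_of_mem List.mem_cons_self, ?_⟩
          have := pvLv_pred_le hedge hacyc hcI hp
          simp only
          omega
      · -- every value of the old queue is dominated by a value of the new one
        intro b hb
        obtain ⟨cd, hcd, rfl⟩ := List.mem_map.mp hb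
        rcases List.mem_cons.mp hcd with rfl | h
        · by_cases hL0 : L = []
          · -- the head contributes d; the nonempty rest dominates it
            have hrest_ne : rest ≠ [] := by
              intro h; rw [h, hL0] at hque_ne; simp at hque_ne
            obtain ⟨r0, hr0⟩ := List.exists_mem_of_ne_nil _ hrest_ne
            refine ⟨r0.2 + pvLv order (n+1) r0.1 - 1,
              List.mem_map_of_mem (List.mem_append.mpr (Or.inl hr0)), ?_⟩
            have h1 : 1 ≤ pvLv order (n+1) r0.1 := by
              have hI := hIcc r0 (List.mem_cons_of_mem _ hr0)
              exact pvLv_ge_one hedge hacyc (pvRank n order r0.1 + 1) r0.1 hI (by omega)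
            have h2 := hd_rest r0 hr0
            have hLv : pvLv order (n+1) c = 1 := (pvLv_eq_one_iff hedge hacyc hcI).mpr hL0
            simp only [hLv]
            omega
          · -- the head's value is matched exactly by a maximal predecessor
            have hunf := pvLv_unfold hedge hacyc hcI (hLdef ▸ hL0)
            rw [← hLdef] at hunf
            have hmem : pvMax0 (L.map (pvLv order (n+1))) ∈ L.map (pvLv order (n+1)) :=
              pvMax0_mem (by simpa using hL0)
            obtain ⟨p0, hp0, hval⟩ := List.mem_map.mp hmem
            refine ⟨(p0, d+1).2 + pvLv order (n+1) (p0, d+1).1 - 1, ?_, ?_⟩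
            · exact List.mem_map_of_mem (List.mem_append.mpr
                (Or.inr (List.mem_map_of_mem hp0)))
            · simp only
              omega
        · exact ⟨_, List.mem_map_of_mem (List.mem_append.mpr (Or.inl h)), le_refl _⟩

lemma pvGetLevel_eq {n : Nat} {order : List (Int × Int)} {pre : PySem.Dict Int (List Int)}
    (hedge : pvEdgeOK n order) (hacyc : pvAcyc n order)
    (hpre : ∀ x, pre.getD x [] = pvPredsL order x) {x : Int} (hx : x ∈ pvIcc n) :
    pvGetLevel pre ((order.length + 2) ^ (n + 1)) x = pvLv order (n+1) x := by
  unfold pvGetLevel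
  rw [hpre x]
  by_cases hL : pvPredsL order x = []
  · rw [if_pos (by simp [hL])]
    exact ((pvLv_eq_one_iff hedge hacyc hx).mpr hL).symm
  · rw [if_neg (by simpa using hL)]
    cases hform : (pvPredsL order x).map (fun nxt => (nxt, (2:Int))) with
    | nil => exact absurd (List.map_eq_nil_iff.mp hform) hL
    | cons hd tl =>
      have hIcc0 : ∀ cd ∈ hd :: tl, cd.1 ∈ pvIcc n := by
        intro cd hcd
        rw [← hform] at hcd
        obtain ⟨p, hp, rfl⟩ := List.mem_map.mp hcd
        exact pvPredsL_mem_Icc hedge hx hp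
      have hpw0 : (hd :: tl).Pairwise (fun a b : Int × Int => a.2 ≤ b.2) := by
        rw [← hform]; exact pvPairwise_const_map _ 2
      have hd2 : hd.2 = 2 := by
        have : hd ∈ hd :: tl := List.mem_cons_self
        rw [← hform] at this
        obtain ⟨p, hp, heq⟩ := List.mem_map.mp this
        rw [← heq]
      have hbd0 : ∀ cd ∈ hd :: tl, cd.2 ≤ hd.2 + 1 := by
        intro cd hcd
        rw [← hform] at hcd
        obtain ⟨p, hp, rfl⟩ := List.mem_map.mp hcd
        omega
      have hμ0 : pvMuQ n order (hd :: tl) < (order.length + 2) ^ (n + 1) := by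
        rw [← hform]
        unfold pvMuQ
        rw [List.map_map]
        have : pvMu n order (pvPredsL order x) < (order.length + 2) ^ (n + 1) :=
          pvMu_preds_lt_fuel hedge hx
        unfold pvMu at this
        exact this
      cases hd with
      | mk c' d' =>
        rw [pvBfsLoop_eq hedge hacyc hpre _ c' d' tl hIcc0 hpw0
          (by simpa using hbd0) hμ0]
        rw [← hform, List.map_map]
        have h1 : (pvPredsL order x).map
            ((fun cd : Int × Int => cd.2 + pvLv order (n+1) cd.1 - 1) ∘ (fun nxt => (nxt, (2:Int))))
            = (pvPredsL order x).map (fun p => 1 + pvLv order (n+1) p) := by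
          apply List.map_congr_left
          intro p _
          simp only [Function.comp]
          ring
        rw [h1, pvMax0_map_add hL 1 (pvLv order (n+1))]
        exact (pvLv_unfold hedge hacyc hx hL).symm


-- ---------- A's sort-by-level dynamic programme ----------

lemma pvFoldMin {n : Nat} {ct : List Int} {order : List (Int × Int)}
    {pre : PySem.Dict Int (List Int)} {cook_time : PySem.Dict Int Int}
    (hedge : pvEdgeOK n order) (hacyc : pvAcyc n order)
    (hpre : ∀ x, pre.getD x [] = pvPredsL order x)
    (hck : ∀ x ∈ pvIcc n, cook_time.getD x 0 = PySem.List.pyGetD ct (x-1) 0) :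
    ∀ (rest : List (Int × Int)) (mt : PySem.Dict Int Int),
      (∀ p ∈ rest, p.1 ∈ pvIcc n ∧ p.2 = pvLv order (n+1) p.1) →
      rest.Pairwise (fun a b => a.2 ≤ b.2) →
      (∀ x ∈ pvIcc n, (∃ v, (x, v) ∈ rest) ∨ mt.get? x = some (pvT ct order (n+1) x)) →
      ∀ x ∈ pvIcc n,
        (rest.foldl (fun mt p =>
          if p.2 = 1 then mt.insert p.1 (cook_time.getD p.1 0)
          else mt.insert p.1 (cook_time.getD p.1 0 +
            PySem.List.maxD ((pre.getD p.1 []).map (fun c => mt.getD c 0)) (fun v => v) 0))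
          mt).get? x = some (pvT ct order (n+1) x) := by
  intro rest
  induction rest with
  | nil =>
    intro mt _ _ h3 x hx
    rcases h3 x hx with ⟨v, hv⟩ | h
    · simp at hv
    · simpa using h
  | cons p t ih =>
    intro mt h1 h2 h3 x hx
    obtain ⟨c, l⟩ := p
    obtain ⟨hcI, hl⟩ := h1 (c, l) List.mem_cons_self
    simp only at hcI hl
    -- every predecessor of c is already finished in mt
    have hpredsdone : ∀ q ∈ pvPredsL order c, mt.get? q = some (pvT ct order (n+1) q) := by
      intro q hq
      have hqI : q ∈ pvIcc n := pvPredsL_mem_Icc hedge hcI hq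
      have hlt : 1 + pvLv order (n+1) q ≤ pvLv order (n+1) c :=
        pvLv_pred_le hedge hacyc hcI hq
      rcases h3 q hqI with ⟨v, hv⟩ | h
      · rcases List.mem_cons.mp hv with heq | hv
        · exfalso
          have : q = c := congrArg Prod.fst heq
          subst this
          omega
        · exfalso
          obtain ⟨_, hval⟩ := h1 (q, v) (List.mem_cons_of_mem _ hv)
          simp only at hval
          have : l ≤ v := (List.pairwise_cons.mp h2).1 (q, v) hv
          omega
      · exact h
    -- the value inserted for c is its critical-path time
    have hval : (if l = 1 then cook_time.getD c 0
        else cook_time.getD c 0 +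
          PySem.List.maxD ((pre.getD c []).map (fun q => mt.getD q 0)) (fun v => v) 0)
        = pvT ct order (n+1) c := by
      by_cases hl1 : l = 1
      · rw [if_pos hl1]
        have hLnil : pvPredsL order c = [] :=
          (pvLv_eq_one_iff hedge hacyc hcI).mp (by omega)
        simp only [pvT, hLnil, List.map_nil]
        rw [hck c hcI, pvMax0_nil]
        omega
      · rw [if_neg hl1]
        have hLne : pvPredsL order c ≠ [] := by
          intro h
          exact hl1 (by rw [hl]; exact (pvLv_eq_one_iff hedge hacyc hcI).mpr h)
        have hmap : ((pre.getD c []).map (fun q => mt.getD q 0))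
            = (pvPredsL order c).map (pvT ct order n) := by
          rw [hpre c]
          apply List.map_congr_left
          intro q hq
          rw [PySem.Dict.getD_eq_get?_getD, hpredsdone q hq]
          have hqI : q ∈ pvIcc n := pvPredsL_mem_Icc hedge hcI hq
          have hr1 := pvRank_lt hedge hacyc hcI hq
          have hr2 := pvRank_le hedge hcI
          exact pvT_stab hedge hacyc (n+1) n q hqI (by omega) (by omega)
        rw [hmap, hck c hcI]
        simp only [pvT, pvMax0]
    -- one step of the fold, then the induction hypothesis
    rw [List.foldl_cons]
    set mt' := (if (c, l).2 = 1 then mt.insert (c, l).1 (cook_time.getD (c, l).1 0)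
      else mt.insert (c, l).1 (cook_time.getD (c, l).1 0 +
        PySem.List.maxD ((pre.getD (c, l).1 []).map (fun q => mt.getD q 0)) (fun v => v) 0))
      with hmt'
    have hmt'c : mt' = mt.insert c (pvT ct order (n+1) c) := by
      rw [hmt']
      simp only
      by_cases hl1 : l = 1
      · rw [if_pos hl1, ← hval, if_pos hl1]
      · rw [if_neg hl1, ← hval, if_neg hl1]
    apply ih mt'
    · intro q hq; exact h1 q (List.mem_cons_of_mem _ hq)
    · exact (List.pairwise_cons.mp h2).2
    · intro z hz
      by_cases hzc : z = c
      · subst hzc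
        right
        rw [hmt'c, PySem.Dict.get?_insert_self]
      · rcases h3 z hz with ⟨v, hv⟩ | h
        · rcases List.mem_cons.mp hv with heq | hv
          · exact absurd (congrArg Prod.fst heq) hzc
          · exact Or.inl ⟨v, hv⟩
        · right
          rw [hmt'c, PySem.Dict.get?_insert_of_ne _ _ hzc, h]
    · exact hx

-- ---------- B's saturation rounds ----------

def pvSeenIter (n : Nat) (order : List (Int × Int)) (k : Int) (r : Nat) : PySem.Set Int :=
  (List.range r).foldl
    (fun s _ => PySem.Set.union s
      (PySem.Set.ofList (s.flatMap (fun c => (pvPredsB (n : Int) order).getD c []))))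
    (PySem.Set.ofList ((pvPredsB (n : Int) order).getD k []))

lemma pvSeenIter_succ (n : Nat) (order : List (Int × Int)) (k : Int) (r : Nat) :
    pvSeenIter n order k (r+1) = PySem.Set.union (pvSeenIter n order k r)
      (PySem.Set.ofList ((pvSeenIter n order k r).flatMap
        (fun c => (pvPredsB (n : Int) order).getD c []))) := by
  unfold pvSeenIter
  rw [List.range_succ, List.foldl_append]
  rfl

lemma pvSeenIter_spec {n : Nat} {order : List (Int × Int)} {k : Int}
    (hedge : pvEdgeOK n order) (hk : k ∈ pvIcc n) :
    ∀ r, (pvSeenIter n order k r).Nodup ∧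
      (∀ y, y ∈ pvSeenIter n order k r ↔ y ∈ (pvStep order)^[r] (pvPredsF order k)) ∧
      (∀ y ∈ pvSeenIter n order k r, y ∈ pvIcc n) := by
  intro r
  induction r with
  | zero =>
    have h0 : pvSeenIter n order k 0 = PySem.Set.ofList (pvPredsL order k) := by
      unfold pvSeenIter
      rw [pvBPreds_getD order hk]
      rfl
    refine ⟨h0 ▸ PySem.Set.nodup_ofList _, ?_, ?_⟩
    · intro y
      rw [h0, PySem.Set.mem_ofList]
      simp only [Function.iterate_zero_apply]
      exact (mem_pvPredsF).symm
    · intro y hy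
      rw [h0, PySem.Set.mem_ofList] at hy
      exact pvPredsL_mem_Icc hedge hk hy
  | succ r ih =>
    obtain ⟨hnd, hmem, hIcc⟩ := ih
    rw [pvSeenIter_succ]
    refine ⟨PySem.Set.nodup_union _ _ hnd, ?_, ?_⟩
    · intro y
      rw [PySem.Set.mem_union, PySem.Set.mem_ofList, List.mem_flatMap]
      rw [Function.iterate_succ_apply']
      unfold pvStep
      rw [Finset.mem_union, Finset.mem_biUnion]
      constructor
      · rintro (hy | ⟨c, hc, hyc⟩)
        · exact Or.inl ((hmem y).mp hy)
        · rw [pvBPreds_getD order (hIcc c hc)] at hyc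
          exact Or.inr ⟨c, (hmem c).mp hc, mem_pvPredsF.mpr hyc⟩
      · rintro (hy | ⟨c, hc, hyc⟩)
        · exact Or.inl ((hmem y).mpr hy)
        · refine Or.inr ⟨c, (hmem c).mpr hc, ?_⟩
          rw [pvBPreds_getD order (hIcc c ((hmem c).mpr hc))]
          exact mem_pvPredsF.mp hyc
    · intro y hy
      rw [PySem.Set.mem_union, PySem.Set.mem_ofList, List.mem_flatMap] at hy
      rcases hy with hy | ⟨c, hc, hyc⟩
      · exact hIcc y hy
      · rw [pvBPreds_getD order (hIcc c hc)] at hyc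
        exact pvPredsL_mem_Icc hedge (hIcc c hc) hyc

-- ---------- B's relaxation rounds ----------

def pvTimeIter (ct : List Int) (order : List (Int × Int)) (r : Nat) : PySem.Dict Int Int :=
  (List.range r).foldl
    (fun t _ => (PySem.List.pyRange 1 ((ct.length : Int)+1)).foldl
        (fun d i => d.insert i (PySem.List.pyGetD ct (i-1) 0 +
            PySem.List.maxD (((pvPredsB ((ct.length : Int)) order).getD i []).map
              (fun p => t.getD p 0)) (fun v => v) 0))
        PySem.Dict.empty)
    ((PySem.List.pyRange 1 ((ct.length : Int)+1)).foldl
      (fun d i => d.insert i (PySem.List.pyGetD ct (i-1) 0)) PySem.Dict.empty)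

lemma pvTimeIter_spec {ct : List Int} {order : List (Int × Int)}
    (hedge : pvEdgeOK ct.length order) (hacyc : pvAcyc ct.length order) :
    ∀ r, ∀ x ∈ pvIcc ct.length, (pvTimeIter ct order r).getD x 0 = pvT ct order (r+1) x := by
  intro r
  induction r with
  | zero =>
    intro x hx
    have hxr : x ∈ PySem.List.pyRange 1 ((ct.length : Int)+1) := by
      rw [PySem.List.mem_pyRange_one]
      have := mem_pvIcc.mp hx
      omega
    have h0 : (pvTimeIter ct order 0).getD x 0 = PySem.List.pyGetD ct (x-1) 0 := by
      unfold pvTimeIter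
      simp only [List.range_zero, List.foldl_nil]
      exact pvGetD_foldl_insert_fresh (PySem.List.pyRange 1 ((ct.length : Int)+1))
        (fun i => i) (fun i => PySem.List.pyGetD ct (i-1) 0)
        (by simpa using PySem.List.nodup_pyRange_one 1 ((ct.length : Int)+1)) hxr 0
    rw [h0]
    simp only [pvT]
    have hz : pvMax0 ((pvPredsL order x).map (fun _ => (0:Int))) = 0 := by
      apply pvMax0_zeros
      intro y hy
      obtain ⟨q, _, rfl⟩ := List.mem_map.mp hy
      rfl
    rw [show (fun x : Int => (0:Int)) = (fun _ : Int => (0:Int)) from rfl, hz]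
    omega
  | succ r ih =>
    intro x hx
    have hxr : x ∈ PySem.List.pyRange 1 ((ct.length : Int)+1) := by
      rw [PySem.List.mem_pyRange_one]
      have := mem_pvIcc.mp hx
      omega
    have hstep : pvTimeIter ct order (r+1)
        = (PySem.List.pyRange 1 ((ct.length : Int)+1)).foldl
            (fun d i => d.insert i (PySem.List.pyGetD ct (i-1) 0 +
                PySem.List.maxD (((pvPredsB ((ct.length : Int)) order).getD i []).map
                  (fun p => (pvTimeIter ct order r).getD p 0)) (fun v => v) 0))
            PySem.Dict.empty := by
      unfold pvTimeIter
      rw [List.range_succ, List.foldl_append]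
      rfl
    rw [hstep]
    have hfresh := pvGetD_foldl_insert_fresh (PySem.List.pyRange 1 ((ct.length : Int)+1))
      (fun i => i)
      (fun i => PySem.List.pyGetD ct (i-1) 0 +
        PySem.List.maxD (((pvPredsB ((ct.length : Int)) order).getD i []).map
          (fun p => (pvTimeIter ct order r).getD p 0)) (fun v => v) 0)
      (by simpa using PySem.List.nodup_pyRange_one 1 ((ct.length : Int)+1)) hxr 0
    rw [hfresh]
    rw [pvBPreds_getD order hx]
    have hmap : (pvPredsL order x).map (fun p => (pvTimeIter ct order r).getD p 0)
        = (pvPredsL order x).map (pvT ct order (r+1)) := by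
      apply List.map_congr_left
      intro q hq
      exact ih q (pvPredsL_mem_Icc hedge hx hq)
    rw [hmap]
    simp only [pvT, pvMax0]


-- ---------- assembling the two ports ----------

lemma pvCookTime_getD (ct : List Int) {x : Int} (hx : x ∈ pvIcc ct.length) :
    ((PySem.List.enumerate ct 1).foldl (fun d p => d.insert p.1 p.2)
        PySem.Dict.empty).getD x 0 = PySem.List.pyGetD ct (x-1) 0 := by
  obtain ⟨hx1, hx2⟩ := mem_pvIcc.mp hx
  have hk0 : (x-1).toNat < ct.length := by omega
  have hxeq : x = 1 + ((x-1).toNat : Int) := by omega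
  have hb : ((1 : Int) + ((x-1).toNat : Int), ct[(x-1).toNat]) ∈ PySem.List.enumerate ct 1 := by
    rw [PySem.List.mem_enumerate_iff]
    exact ⟨(x-1).toNat, hk0, rfl⟩
  have hnd : ((PySem.List.enumerate ct 1).map (fun p => p.1)).Nodup := by
    rw [PySem.List.map_fst_enumerate]
    exact PySem.List.nodup_pyRange_one _ _
  have h1 := pvGetD_foldl_insert_fresh (PySem.List.enumerate ct 1)
    (fun p => p.1) (fun p => p.2) hnd hb 0
  simp only at h1
  rw [hxeq, h1]
  rw [PySem.List.pyGetD_of_nonneg ct 0 (by omega)]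
  have : ((1:Int) + ((x-1).toNat : Int) - 1).toNat = (x-1).toNat := by omega
  rw [this, List.getD_eq_getElem ct 0 hk0]

lemma pvSolutionA_eq {ct : List Int} {order : List (Int × Int)} {k : Int}
    (hedge : pvEdgeOK ct.length order) (hacyc : pvAcyc ct.length order)
    (hk : k ∈ pvIcc ct.length) :
    solution ct order k
      = [((pvReach ct.length order k).card : Int), pvT ct order (ct.length + 1) k] := by
  unfold solution
  dsimp only
  set preA := order.foldl (fun d pc => d.modify pc.2 [] (fun l => l ++ [pc.1]))
    PySem.Dict.empty with hpreAdef
  set cookA := (PySem.List.enumerate ct 1).foldl (fun d p => d.insert p.1 p.2)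
    PySem.Dict.empty with hcookAdef
  have hpreA : ∀ x, preA.getD x [] = pvPredsL order x := by
    intro x; rw [hpreAdef]; exact pvAPre_getD order x
  have hckA : ∀ x ∈ pvIcc ct.length, cookA.getD x 0 = PySem.List.pyGetD ct (x-1) 0 := by
    intro x hx; rw [hcookAdef]; exact pvCookTime_getD ct hx
  rw [hpreA k]
  congr 1
  · -- the needed-set count
    have hμ : pvMu ct.length order (pvPredsL order k) < (order.length + 2) ^ (ct.length + 1) :=
      pvMu_preds_lt_fuel hedge hk
    have hstackIcc : ∀ x ∈ pvPredsL order k, x ∈ pvIcc ct.length := by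
      intro x hx; exact pvPredsL_mem_Icc hedge hk hx
    have hmem := mem_pvNeedsLoop hedge hacyc hpreA ((order.length + 2) ^ (ct.length + 1))
      PySem.Set.empty (pvPredsL order k) hstackIcc hμ
    have hnd : (pvNeedsLoop preA ((order.length + 2) ^ (ct.length + 1))
        PySem.Set.empty (pvPredsL order k)).Nodup :=
      pvNeedsLoop_nodup preA _ _ _ List.nodup_nil
    have htf : (pvNeedsLoop preA ((order.length + 2) ^ (ct.length + 1))
        PySem.Set.empty (pvPredsL order k)).toFinset = pvReach ct.length order k := by
      ext y
      rw [List.mem_toFinset, hmem y]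
      constructor
      · rintro (h | ⟨x, hx, hyx⟩)
        · exact absurd h (List.not_mem_nil)
        · exact (mem_pvReach_iff hedge hk y).mpr ⟨x, hx, hyx⟩
      · intro h
        exact Or.inr ((mem_pvReach_iff hedge hk y).mp h)
    have hlen : (pvNeedsLoop preA ((order.length + 2) ^ (ct.length + 1))
        PySem.Set.empty (pvPredsL order k)).length = (pvReach ct.length order k).card := by
      rw [← List.toFinset_card_of_nodup hnd, htf]
    exact_mod_cast congrArg (fun m : Nat => (m : Int)) hlen
  · -- the completion time
    congr 1
    have hitems0 : (pvGetLevels preA ((order.length + 2) ^ (ct.length + 1)) (ct.length : Int)).items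
        = PySem.Dict.empty.items ++ (PySem.List.pyRange 1 ((ct.length : Int)+1)).map
            (fun i => (i, pvGetLevel preA ((order.length + 2) ^ (ct.length + 1)) i)) := by
      exact PySem.Dict.items_foldl_insert_fresh _ (fun i => i)
        (fun i => pvGetLevel preA ((order.length + 2) ^ (ct.length + 1)) i) PySem.Dict.empty
        (by intro a _; simp [PySem.Dict.contains_empty])
        (by simpa using PySem.List.nodup_pyRange_one 1 ((ct.length : Int)+1))
    have hempty : PySem.Dict.empty.items = ([] : List (Int × Int)) := rfl
    have hitems : (pvGetLevels preA ((order.length + 2) ^ (ct.length + 1)) (ct.length : Int)).items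
        = (PySem.List.pyRange 1 ((ct.length : Int)+1)).map
            (fun i => (i, pvLv order (ct.length + 1) i)) := by
      rw [hitems0, hempty, List.nil_append]
      apply List.map_congr_left
      intro i hi
      have hiI : i ∈ pvIcc ct.length := by
        rw [mem_pvIcc]
        have := PySem.List.mem_pyRange_one.mp hi
        omega
      rw [pvGetLevel_eq hedge hacyc hpreA hiI]
    unfold pvGetMinTimes
    rw [hitems]
    have hfold := pvFoldMin hedge hacyc hpreA hckA
      (PySem.List.sorted ((PySem.List.pyRange 1 ((ct.length : Int)+1)).map
        (fun i => (i, pvLv order (ct.length + 1) i))) (fun x => x.2) false)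
      PySem.Dict.empty
      (by
        intro p hp
        rw [PySem.List.mem_sorted] at hp
        obtain ⟨i, hi, rfl⟩ := List.mem_map.mp hp
        have hiI : i ∈ pvIcc ct.length := by
          rw [mem_pvIcc]
          have := PySem.List.mem_pyRange_one.mp hi
          omega
        exact ⟨hiI, rfl⟩)
      (PySem.List.sorted_pairwise _ _)
      (by
        intro x hx
        left
        refine ⟨pvLv order (ct.length + 1) x, ?_⟩
        rw [PySem.List.mem_sorted]
        apply List.mem_map_of_mem (f := fun i => (i, pvLv order (ct.length + 1) i))
        rw [PySem.List.mem_pyRange_one]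
        have := mem_pvIcc.mp hx
        omega)
      k hk
    rw [PySem.Dict.getD_eq_get?_getD, hfold]
    rfl

lemma pvSolutionB_eq {ct : List Int} {order : List (Int × Int)} {k : Int}
    (hedge : pvEdgeOK ct.length order) (hacyc : pvAcyc ct.length order)
    (hk : k ∈ pvIcc ct.length) :
    solution_alt ct order k
      = [((pvReach ct.length order k).card : Int), pvT ct order (ct.length + 1) k] := by
  unfold solution_alt
  dsimp only
  obtain ⟨hnd, hmem, _⟩ := pvSeenIter_spec hedge hk ct.length
  congr 1
  · -- the reachable-set count
    have htf : (pvSeenIter ct.length order k ct.length).toFinset = pvReach ct.length order k := by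
      ext y
      rw [List.mem_toFinset, hmem y]
      rfl
    have hlen : (pvSeenIter ct.length order k ct.length).length
        = (pvReach ct.length order k).card := by
      rw [← List.toFinset_card_of_nodup hnd, htf]
    exact_mod_cast congrArg (fun m : Nat => (m : Int)) hlen
  · congr 1
    exact pvTimeIter_spec hedge hacyc ct.length k hk

-- ===== VERDICT (by name: the statement is the Claim_ definition above) =====
theorem solution_spec : Claim_equal_solution := by
  intro ct order k _ hpre
  obtain ⟨hk1, hk2, hedge, hacyc⟩ := hpre
  have hk : k ∈ pvIcc ct.length := mem_pvIcc.mpr ⟨hk1, hk2⟩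
  have hedge' : pvEdgeOK ct.length order := hedge
  have hacyc' : pvAcyc ct.length order := hacyc
  show solution ct order k = solution_alt ct order k
  rw [pvSolutionA_eq hedge' hacyc' hk, pvSolutionB_eq hedge' hacyc' hk]
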